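-- pv_equiv track=rewrite | github.com/libindic/indicfortune | libindic/fortune/core.py | fortunes
-- ===== SOURCE A (Python) =====
-- def fortunes(infile, pattern=None):
--     """ Yield fortunes as lists of lines """
--     quotes = []
--     results = []
--     quote = ''
--     for line in infile:
--         #line = unicode(line)
--         if line == "%\n":
--             quotes.append(quote)
--             quote = ''
--         else:
--             quote += line
--     if pattern:
--         for quote in quotes:
--             if quote.find(pattern) >= 0:
--                 results.append(quote)
--         return results
--     return quotes
-- ===== SOURCE B (Python) =====
-- def fortunes(infile, pattern=None):
--     """ Yield fortunes as lists of lines """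
--     rest = list(infile)
--     quotes = []
--     while True:
--         try:
--             i = rest.index("%\n")
--         except ValueError:
--             break
--         quotes.append("".join(rest[:i]))
--         rest = rest[i + 1:]
--     if pattern:
--         return [q for q in quotes if pattern in q]
--     return quotes
-- ===== Notes on version B (the rewrite author's own statement) =====
-- stated objective: alternative
-- what changed: Replaces A's line-by-line string accumulation loop with repeated index()-based separator search plus slice-and-join block extraction, and replaces A's find()>=0 append loop with an 'in'-based list comprehension.
import Mathlib
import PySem

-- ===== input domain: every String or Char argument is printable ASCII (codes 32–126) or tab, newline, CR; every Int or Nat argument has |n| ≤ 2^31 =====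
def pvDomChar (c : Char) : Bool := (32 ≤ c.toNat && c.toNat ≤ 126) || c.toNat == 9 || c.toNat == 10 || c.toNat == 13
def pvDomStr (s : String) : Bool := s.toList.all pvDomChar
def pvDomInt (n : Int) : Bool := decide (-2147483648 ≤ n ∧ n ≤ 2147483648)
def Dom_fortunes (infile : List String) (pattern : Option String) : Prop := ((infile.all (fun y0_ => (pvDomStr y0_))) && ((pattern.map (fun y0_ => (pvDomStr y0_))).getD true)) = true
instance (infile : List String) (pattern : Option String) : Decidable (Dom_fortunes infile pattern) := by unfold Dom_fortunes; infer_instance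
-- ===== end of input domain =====

-- B replaces A's line-accumulation loop by repeated index()-search for the "%\n"
-- separator with slice-and-join block extraction (objective: alternative, not faster).

-- ===== PORT A =====
def fortunes (infile : List String) (pattern : Option String) : List String :=
  -- quotes/quote accumulated by the for-loop over infile
  let st := infile.foldl
    (fun (st : List String × String) line =>
      if line = "%\n" then (st.1 ++ [st.2], "") else (st.1, st.2 ++ line))
    (([] : List String), "")
  let quotes := st.1
  match pattern with
  | none => quotes
  | some p =>
      if p = "" then quotes
      else
        -- results-accumulation loop with quote.find(pattern) >= 0
        quotes.foldl (fun results q => if 0 ≤ PySem.Str.find q p then results ++ [q] else results) []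

-- ===== PORT B =====
-- the while-True loop: rest.index("%\n"), append "".join(rest[:i]), rest = rest[i+1:]
def fortunesAltBlocks (rest : List String) (quotes : List String) : List String :=
  match h : PySem.List.index? rest "%\n" with
  | none => quotes
  | some i =>
      fortunesAltBlocks (PySem.List.slice rest (some ((i : Int) + 1)) none)
        (quotes ++ [PySem.Str.join "" (PySem.List.slice rest none (some (i : Int)))])
termination_by rest.length
decreasing_by
  obtain ⟨pre, suf, hrest, hlen, -⟩ := (PySem.List.index?_eq_some_iff rest "%\n" i).mp h
  rw [PySem.List.slice_from rest (by omega : (0:Int) ≤ (i : Int) + 1)]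
  subst hrest
  simp [List.length_drop]

def fortunes_alt (infile : List String) (pattern : Option String) : List String :=
  let quotes := fortunesAltBlocks infile []
  match pattern with
  | none => quotes
  | some p =>
      if p = "" then quotes
      else quotes.filter (fun q => PySem.Str.isIn p q)

-- ===== PRECONDITION & SPEC =====
def Spec_fortunes (infile : List String) (pattern : Option String) (out : List String) : Prop := out = fortunes_alt infile pattern
instance (infile : List String) (pattern : Option String) (out : List String) : Decidable (Spec_fortunes infile pattern out) := by unfold Spec_fortunes; infer_instance

-- ===== CLAIM (what is proved, stated in full; the proofs are below) =====
def Claim_equal_fortunes : Prop := ∀ (infile : List String) (pattern : Option String), Dom_fortunes infile pattern → Spec_fortunes infile pattern (fortunes infile pattern)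

-- ===== LEMMAS AND PROOFS =====

-- abstract description of the quote list both programs produce
def pvConsume (q : String) : List String → List String
  | [] => []
  | l :: ls => if l = "%\n" then q :: pvConsume "" ls else pvConsume (q ++ l) ls

lemma pvConsume_of_not_mem (ls : List String) (q : String) (h : "%\n" ∉ ls) :
    pvConsume q ls = [] := by
  induction ls generalizing q with
  | nil => rfl
  | cons l ls ih =>
      simp only [List.mem_cons, not_or] at h
      simp [pvConsume, Ne.symm h.1, ih _ h.2]

lemma pvJoin_empty_nil : PySem.Str.join "" ([] : List String) = "" := by
  apply String.toList_inj.mp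
  simp [PySem.Str.toList_join, PySem.Chars.join_nil]

lemma pvJoin_empty_cons (s : String) (rest : List String) :
    PySem.Str.join "" (s :: rest) = s ++ PySem.Str.join "" rest := by
  apply String.toList_inj.mp
  cases rest with
  | nil => simp [PySem.Str.toList_join, PySem.Chars.join_nil, PySem.Chars.join_singleton]
  | cons t rest => simp [PySem.Str.toList_join, PySem.Chars.join_cons_cons]

lemma pvConsume_append (pre suf : List String) (q : String) (hpre : "%\n" ∉ pre) :
    pvConsume q (pre ++ "%\n" :: suf) = (q ++ PySem.Str.join "" pre) :: pvConsume "" suf := by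
  induction pre generalizing q with
  | nil => simp [pvConsume, pvJoin_empty_nil]
  | cons l pre ih =>
      simp only [List.mem_cons, not_or] at hpre
      simp [pvConsume, Ne.symm hpre.1, ih _ hpre.2, pvJoin_empty_cons, String.append_assoc]

lemma fortunes_loop (ls : List String) (qs : List String) (q : String) :
    (ls.foldl
      (fun (st : List String × String) line =>
        if line = "%\n" then (st.1 ++ [st.2], "") else (st.1, st.2 ++ line))
      (qs, q)).1 = qs ++ pvConsume q ls := by
  induction ls generalizing qs q with
  | nil => simp [pvConsume]
  | cons l ls ih =>
      by_cases h : l = "%\n"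
      · simp [h, pvConsume, List.foldl_cons, ih]
      · simp [h, pvConsume, List.foldl_cons, ih]

lemma fortunesAltBlocks_aux : ∀ (n : Nat) (rest quotes : List String), rest.length ≤ n →
    fortunesAltBlocks rest quotes = quotes ++ pvConsume "" rest := by
  intro n
  induction n with
  | zero =>
      intro rest quotes hlen
      have hr : rest = [] := List.eq_nil_of_length_eq_zero (Nat.le_zero.mp hlen)
      subst hr
      rw [fortunesAltBlocks]
      simp [pvConsume]
  | succ n ih =>
      intro rest quotes hlen
      rw [fortunesAltBlocks]
      split
      case h_1 h =>
        rw [pvConsume_of_not_mem _ _ ((PySem.List.index?_eq_none_iff rest "%\n").mp h)]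
        simp
      case h_2 i h =>
        obtain ⟨pre, suf, hrest, hlen2, hmem⟩ := (PySem.List.index?_eq_some_iff rest "%\n" i).mp h
        have hdroplen : (PySem.List.slice rest (some ((i : Int) + 1)) none).length ≤ n := by
          rw [PySem.List.slice_from rest (by omega : (0:Int) ≤ (i : Int) + 1)]
          subst hrest
          simp [List.length_drop] at hlen ⊢
          omega
        rw [ih _ _ hdroplen]
        have htake : PySem.List.slice rest none (some (i : Int)) = pre := by
          rw [PySem.List.slice_to_natCast, hrest, ← hlen2, List.take_left]
        have hdrop : PySem.List.slice rest (some ((i : Int) + 1)) none = suf := by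
          rw [PySem.List.slice_from rest (by omega : (0:Int) ≤ (i : Int) + 1), hrest]
          have h1 : ((i : Int) + 1).toNat = pre.length + 1 := by omega
          rw [h1]
          have h2 : pre ++ "%\n" :: suf = (pre ++ ["%\n"]) ++ suf := by simp
          rw [h2]
          have hl : pre.length + 1 = (pre ++ ["%\n"]).length := by simp
          rw [hl, List.drop_left]
        rw [htake, hdrop, hrest, pvConsume_append pre suf "" hmem]
        simp

lemma fortunesAltBlocks_eq (rest quotes : List String) :
    fortunesAltBlocks rest quotes = quotes ++ pvConsume "" rest :=
  fortunesAltBlocks_aux rest.length rest quotes (Nat.le_refl _)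

lemma pvFoldl_if_filter (P : String → Prop) [DecidablePred P] (l acc : List String) :
    l.foldl (fun res q => if P q then res ++ [q] else res) acc
      = acc ++ l.filter (fun q => decide (P q)) := by
  induction l generalizing acc with
  | nil => simp
  | cons x l ih =>
      by_cases h : P x
      · simp [h, List.foldl_cons, ih]
      · simp [h, List.foldl_cons, ih]

-- ===== VERDICT (by name: the statement is the Claim_ definition above) =====
theorem fortunes_spec : Claim_equal_fortunes := by
  intro infile pattern _dom
  unfold Spec_fortunes fortunes fortunes_alt
  simp only [fortunes_loop, fortunesAltBlocks_eq, List.nil_append]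
  cases pattern with
  | none => rfl
  | some p =>
      by_cases hp : p = ""
      · simp [hp]
      · simp only [hp, ite_false]
        rw [pvFoldl_if_filter (fun q => 0 ≤ PySem.Str.find q p)]
        simp only [List.nil_append]
        apply List.filter_congr
        intro q _
        rw [Bool.eq_iff_iff, decide_eq_true_eq, PySem.Str.find_nonneg_iff, PySem.Str.isIn_iff_infix]
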